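-- pv_equiv track=rewrite | github.com/simonschaluppe/FLUCCOplus | FLUCCOplus/signals.py | signal_points_from_series
-- ===== SOURCE A (Python) =====
-- def signal_points_from_series(series):
--     count = 0
--     ds = 0
--     dn = 0
--     prev = 1
--     hour = 0
--     signals = [(0,0,0)]
--     for hour, i in enumerate(series):
--         if i == prev: # keep counting
--             if i == 1:
--                 ds += 1
--             else:
--                 dn += 1
--         if i != prev:
--             if i == 1:
--                 count += 1
--                 signals.append((hour, dn, ds))
--                 ds = 1
--                 dn = 0
--             else:
--                 dn+=1
--         prev = i
--
--     return signals
-- ===== SOURCE B (Python) =====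
-- def signal_points_from_series(series):
--     # Pass 1: run-length encode the series into (value, length) runs.
--     runs = []  # current run at runs[-1]
--     for x in series:
--         if runs and runs[-1][0] == x:
--             runs[-1] = (x, runs[-1][1] + 1)
--         else:
--             runs.append((x, 1))
--     # Pass 2: fold over runs instead of individual elements.
--     signals = [(0, 0, 0)]
--     prev, ds, dn, hour = 1, 0, 0, 0
--     for val, length in runs:
--         if val == 1:
--             if prev == 1:
--                 ds += length
--             else:
--                 signals.append((hour, dn, ds))
--                 ds = length
--                 dn = 0
--         else:
--             dn += length
--         prev = val
--         hour += length
--     return signals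
-- ===== Notes on version B (the rewrite author's own statement) =====
-- stated objective: alternative
-- what changed: B first run-length-encodes the series into (value, length) runs and then folds the edge-detection state machine over runs, instead of A's element-by-element comparison with the previous value.
import Mathlib
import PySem

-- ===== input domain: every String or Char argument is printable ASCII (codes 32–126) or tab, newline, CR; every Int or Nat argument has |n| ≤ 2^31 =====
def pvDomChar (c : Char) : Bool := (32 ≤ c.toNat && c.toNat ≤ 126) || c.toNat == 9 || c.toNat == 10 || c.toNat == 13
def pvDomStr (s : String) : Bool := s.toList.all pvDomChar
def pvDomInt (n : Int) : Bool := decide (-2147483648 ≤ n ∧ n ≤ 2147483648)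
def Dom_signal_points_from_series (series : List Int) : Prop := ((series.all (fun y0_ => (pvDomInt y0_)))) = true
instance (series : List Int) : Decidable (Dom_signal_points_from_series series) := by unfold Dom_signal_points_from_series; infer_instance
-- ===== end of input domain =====

-- B replaces A's element-by-element edge detection by a two-pass run-length-encoding
-- decomposition (encode runs, then fold over runs); objective: alternative decomposition.

-- ===== PORT A =====
-- A's loop over enumerate(series); state (hour, count, ds, dn, prev); appends become emitted heads.
def spfsLoopA (series : List Int) (hour count ds dn prev : Int) : List (Int × Int × Int) :=
  match series with
  | [] => []
  | i :: rest =>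
    if i = prev then
      if i = 1 then spfsLoopA rest (hour + 1) count (ds + 1) dn i
      else spfsLoopA rest (hour + 1) count ds (dn + 1) i
    else
      if i = 1 then
        (hour, dn, ds) :: spfsLoopA rest (hour + 1) (count + 1) 1 0 i
      else spfsLoopA rest (hour + 1) count ds (dn + 1) i

def signal_points_from_series (series : List Int) : List (Int × Int × Int) :=
  (0, 0, 0) :: spfsLoopA series 0 0 0 0 1

-- ===== PORT B =====
-- B pass 1: runs kept head-first (runs[-1] ↦ head of accumulator), reversed at the end.
def spfsRleStep (racc : List (Int × Int)) (x : Int) : List (Int × Int) :=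
  match racc with
  | (y, n) :: rs => if y = x then (x, n + 1) :: rs else (x, 1) :: (y, n) :: rs
  | [] => [(x, 1)]

-- B pass 2: loop over the runs; state (prev, ds, dn, hour); appends become emitted heads.
def spfsConsume (runs : List (Int × Int)) (prev ds dn hour : Int) : List (Int × Int × Int) :=
  match runs with
  | [] => []
  | (val, len) :: rs =>
    if val = 1 then
      if prev = 1 then spfsConsume rs val (ds + len) dn (hour + len)
      else (hour, dn, ds) :: spfsConsume rs val len 0 (hour + len)
    else spfsConsume rs val ds (dn + len) (hour + len)

def signal_points_from_series_alt (series : List Int) : List (Int × Int × Int) :=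
  (0, 0, 0) :: spfsConsume ((series.foldl spfsRleStep []).reverse) 1 0 0 0

-- ===== PRECONDITION & SPEC =====
def Spec_signal_points_from_series (series : List Int) (out : List (Int × Int × Int)) : Prop := out = signal_points_from_series_alt series
instance (series : List Int) (out : List (Int × Int × Int)) : Decidable (Spec_signal_points_from_series series out) := by unfold Spec_signal_points_from_series; infer_instance

-- ===== CLAIM (what is proved, stated in full; the proofs are below) =====
def Claim_equal_signal_points_from_series : Prop := ∀ (series : List Int), Dom_signal_points_from_series series → Spec_signal_points_from_series series (signal_points_from_series series)

-- ===== LEMMAS AND PROOFS =====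

-- Canonical RLE of a list whose current (open) run is (y, n): proof-only bridge.
def spfsFrom (y n : Int) : List Int → List (Int × Int)
  | [] => [(y, n)]
  | x :: r => if y = x then spfsFrom y (n + 1) r else (y, n) :: spfsFrom x 1 r

-- The reversed foldl accumulator is the canonical RLE continuation.
theorem spfs_foldl_eq (rest : List Int) : ∀ (racc : List (Int × Int)) (y n : Int),
    (rest.foldl spfsRleStep ((y, n) :: racc)).reverse = racc.reverse ++ spfsFrom y n rest := by
  induction rest with
  | nil => intro racc y n; simp [spfsFrom]
  | cons x r ih =>
    intro racc y n
    by_cases h : y = x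
    · simp [spfsRleStep, spfsFrom, h, ih]
    · simp only [List.foldl_cons, spfsRleStep, if_neg h, spfsFrom, ih ((y, n) :: racc) x 1]
      simp [h]

-- Main bridge: consuming the canonical RLE with the pre-run state equals A's loop after the run.
theorem spfs_consume_from (rest : List Int) : ∀ (y n prev ds dn hour c : Int),
    spfsConsume (spfsFrom y n rest) prev ds dn hour =
      (if y = 1 then
        (if prev = 1 then spfsLoopA rest (hour + n) c (ds + n) dn 1
         else (hour, dn, ds) :: spfsLoopA rest (hour + n) c n 0 1)
       else spfsLoopA rest (hour + n) c ds (dn + n) y) := by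
  induction rest with
  | nil =>
    intro y n prev ds dn hour c
    by_cases hy : y = 1 <;> by_cases hp : prev = 1 <;>
      simp [spfsFrom, spfsConsume, spfsLoopA, hy, hp]
  | cons x r ih =>
    intro y n prev ds dn hour c
    by_cases hxy : y = x
    · subst hxy
      rw [spfsFrom, if_pos rfl, ih y (n + 1) prev ds dn hour c]
      by_cases hy : y = 1 <;> by_cases hp : prev = 1
      all_goals try simp only [spfsLoopA, hy, hp, reduceIte]
      all_goals try (split_ifs <;> simp_all)
      all_goals try ring_nf
    · rw [spfsFrom, if_neg hxy]
      by_cases hx : x = 1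
      · subst hx
        -- then y ≠ 1 (else y = x), so the (y,n) run only bumps dn, and x opens a 1-run
        have hy : ¬ y = 1 := hxy
        rw [spfsConsume, if_neg hy, ih 1 1 y ds (dn + n) (hour + n) (c + 1)]
        all_goals try simp only [spfsLoopA, hy, reduceIte]
        all_goals try (split_ifs <;> simp_all)
        all_goals try ring_nf
      · by_cases hy : y = 1
        · subst hy
          by_cases hp : prev = 1
          · rw [spfsConsume, if_pos rfl, if_pos hp, ih x 1 1 (ds + n) dn (hour + n) c]
            all_goals try simp only [spfsLoopA, hx, hp, reduceIte]
            all_goals try (split_ifs <;> simp_all)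
            all_goals try ring_nf
          · rw [spfsConsume, if_pos rfl, if_neg hp, ih x 1 1 n 0 (hour + n) c]
            all_goals try simp only [spfsLoopA, hx, hp, reduceIte]
            all_goals try (split_ifs <;> simp_all)
            all_goals try ring_nf
        · rw [spfsConsume, if_neg hy, ih x 1 y ds (dn + n) (hour + n) c]
          all_goals try simp only [spfsLoopA, hx, hy, if_true, if_false, reduceIte]
          all_goals try (split_ifs <;> simp_all)
          all_goals try ring_nf

-- ===== VERDICT (by name: the statement is the Claim_ definition above) =====
theorem signal_points_from_series_spec : Claim_equal_signal_points_from_series := by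
  intro series _
  unfold Spec_signal_points_from_series signal_points_from_series signal_points_from_series_alt
  cases series with
  | nil => rfl
  | cons x rest =>
    have hr : ((x :: rest).foldl spfsRleStep []).reverse = spfsFrom x 1 rest := by
      simpa [spfsRleStep] using spfs_foldl_eq rest [] x 1
    rw [hr, spfs_consume_from rest x 1 1 0 0 0 0]
    by_cases hx : x = 1 <;> simp [spfsLoopA, hx]
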